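-- pv_equiv track=rewrite | github.com/WHaverals/syllabify | syllabification/utils.py | x_and_y
-- ===== SOURCE A (Python) =====
-- def x_and_y(data):
--     tokens, segmentations = [], []
--     for token in data:
--         chars, labels = [], []
--         for idx, char in enumerate(token):
--             if char != '-':
--                 chars.append(char)
--             else:
--                 continue
--             if idx == 0:
--                 labels.append(0)
--             else:
--                 if token[idx - 1] == '-':
--                     labels.append(1) # beginning of syllable
--                 else:
--                     labels.append(0)
--         tokens.append(chars)
--         segmentations.append(labels)
--     return tokens, segmentations
-- ===== SOURCE B (Python) =====
-- def x_and_y(data):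
--     # Split each token into its syllable segments on '-', then build the outputs
--     # segment-wise: the first segment contributes all-zero labels, every later
--     # non-empty segment contributes a 1 (syllable start) followed by zeros.
--     tokens, segmentations = [], []
--     for token in data:
--         segs = token.split('-')
--         tokens.append([c for seg in segs for c in seg])
--         labels = [0] * len(segs[0])
--         for seg in segs[1:]:
--             if seg:
--                 labels = labels + [1] + [0] * (len(seg) - 1)
--         segmentations.append(labels)
--     return tokens, segmentations
-- ===== Notes on version B (the rewrite author's own statement) =====
-- stated objective: alternative
-- what changed: B splits each token into syllable segments with token.split('-') and builds labels segment-wise ([0]*len for the first segment, [1]+[0]*(len-1) for each later non-empty segment) instead of A's char-by-char loop with a token[idx-1] predecessor lookup.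
import Mathlib
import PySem

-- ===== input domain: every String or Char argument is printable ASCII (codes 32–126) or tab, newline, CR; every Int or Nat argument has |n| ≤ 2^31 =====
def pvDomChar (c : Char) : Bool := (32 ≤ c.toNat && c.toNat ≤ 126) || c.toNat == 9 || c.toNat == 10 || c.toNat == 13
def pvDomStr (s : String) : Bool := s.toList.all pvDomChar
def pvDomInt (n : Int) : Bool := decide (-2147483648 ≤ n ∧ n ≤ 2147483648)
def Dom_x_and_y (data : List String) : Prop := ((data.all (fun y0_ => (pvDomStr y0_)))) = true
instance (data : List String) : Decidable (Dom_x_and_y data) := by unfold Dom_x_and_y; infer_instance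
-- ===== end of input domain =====

-- B splits each token on '-' and builds the labels segment-wise instead of A's
-- char loop with a token[idx-1] predecessor lookup; objective: alternative.

-- ===== PORT A =====
-- inner loop of A over one token; `token[idx-1]` is read with pyGetD: the index
-- idx-1 is always in range there (the branch runs only when idx ≥ 1), so it is exact.
def xyCharsA (t : List Char) : List String × List Int :=
  (PySem.List.enumerate t 0).foldl
    (fun (cl : List String × List Int) (p : Int × Char) =>
      if p.2 ≠ '-' then
        (cl.1 ++ [String.ofList [p.2]],
         if p.1 = 0 then cl.2 ++ [(0 : Int)]
         else if PySem.List.pyGetD t (p.1 - 1) ' ' = '-' then cl.2 ++ [(1 : Int)]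
         else cl.2 ++ [(0 : Int)])
      else cl)
    ([], [])

def x_and_y (data : List String) : List (List String) × List (List Int) :=
  data.foldl
    (fun (acc : List (List String) × List (List Int)) token =>
      let cl := xyCharsA token.toList
      (acc.1 ++ [cl.1], acc.2 ++ [cl.2]))
    ([], [])

-- ===== PORT B =====
-- token.split('-') is ported as List.splitOn '-' on the char list (exact for a
-- one-char separator: same segments, '' → ['']); segs[0] is read with headD,
-- exact because split always returns a non-empty list.
def x_and_y_alt (data : List String) : List (List String) × List (List Int) :=
  data.foldl
    (fun (acc : List (List String) × List (List Int)) token =>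
      let segs := List.splitOn '-' token.toList
      let chars := segs.flatMap (fun seg => seg.map (fun c => String.ofList [c]))
      let labels := segs.tail.foldl
        (fun (ls : List Int) seg =>
          if seg ≠ [] then ls ++ [(1 : Int)] ++ List.replicate (seg.length - 1) (0 : Int) else ls)
        (List.replicate (segs.headD []).length (0 : Int))
      (acc.1 ++ [chars], acc.2 ++ [labels]))
    ([], [])

-- ===== PRECONDITION & SPEC =====
def Spec_x_and_y (data : List String) (out : List (List String) × List (List Int)) : Prop := out = x_and_y_alt data
instance (data : List String) (out : List (List String) × List (List Int)) : Decidable (Spec_x_and_y data out) := by unfold Spec_x_and_y; infer_instance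

-- ===== CLAIM (what is proved, stated in full; the proofs are below) =====
def Claim_equal_x_and_y : Prop := ∀ (data : List String), Dom_x_and_y data → Spec_x_and_y data (x_and_y data)

-- ===== LEMMAS AND PROOFS =====

-- canonical per-token labels: the running char is the predecessor (sentinel ' ')
def labsOf : Char → List Char → List Int
  | _, [] => []
  | p, c :: t => if c = '-' then labsOf '-' t else (if p = '-' then (1 : Int) else 0) :: labsOf c t

-- A's inner fold over the suffix of the token starting at position k equals the
-- zip-filter-map of that suffix, provided p is the predecessor character
-- (the sentinel ' ' at k = 0).
lemma xyCharsA_suffix (t0 : List Char) :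
    ∀ (s : List Char) (k : Nat) (p : Char) (acc : List String × List Int),
      t0.drop k = s →
      p = (if k = 0 then ' ' else t0.getD (k - 1) ' ') →
      ((PySem.List.enumerate s (k : Int)).foldl
        (fun (cl : List String × List Int) (q : Int × Char) =>
          if q.2 ≠ '-' then
            (cl.1 ++ [String.ofList [q.2]],
             if q.1 = 0 then cl.2 ++ [(0 : Int)]
             else if PySem.List.pyGetD t0 (q.1 - 1) ' ' = '-' then cl.2 ++ [(1 : Int)]
             else cl.2 ++ [(0 : Int)])
          else cl)
        acc)
      = (acc.1 ++ (((p :: s).zip s).filter (fun pc => pc.2 ≠ '-')).map (fun pc => String.ofList [pc.2]),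
         acc.2 ++ (((p :: s).zip s).filter (fun pc => pc.2 ≠ '-')).map (fun pc => if pc.1 = '-' then (1 : Int) else 0)) := by
  intro s
  induction s with
  | nil =>
      intro k p acc _ _
      simp [PySem.List.enumerate]
  | cons c s ih =>
      intro k p acc hs hp
      have hk : t0[k]? = some c := by
        have : (t0.drop k)[0]? = some c := by rw [hs]; rfl
        simpa using this
      have hdrop : t0.drop (k + 1) = s := by
        have : (t0.drop k).drop 1 = s := by rw [hs]; rfl
        simpa [List.drop_drop] using this
      have hcast : ((k : Int) + 1) = ((k + 1 : Nat) : Int) := by push_cast; ring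
      rw [PySem.List.enumerate_cons, List.foldl_cons, hcast]
      by_cases hc : c = '-'
      · -- dash: A skips, the filter drops the pair
        rw [ih (k + 1) c _ hdrop (by simp [List.getD, hk])]
        simp [hc]
      · -- non-dash: the appended label equals the predecessor test
        have hlab : (if (k : Int) = 0 then acc.2 ++ [(0 : Int)]
              else if PySem.List.pyGetD t0 ((k : Int) - 1) ' ' = '-' then acc.2 ++ [(1 : Int)]
              else acc.2 ++ [(0 : Int)])
            = acc.2 ++ [if p = '-' then (1 : Int) else 0] := by
          rcases Nat.eq_zero_or_pos k with hk0 | hk1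
          · subst hk0
            simp at hp
            subst hp
            norm_num
            decide
          · have hkne : ((k : Int)) ≠ 0 := by exact_mod_cast Nat.pos_iff_ne_zero.mp hk1
            have : ((k : Int) - 1) = ((k - 1 : Nat) : Int) := by omega
            rw [if_neg hkne, this, PySem.List.pyGetD_natCast]
            have hp' : p = t0.getD (k - 1) ' ' := by
              rw [hp, if_neg (Nat.pos_iff_ne_zero.mp hk1)]
            rw [← hp']
            by_cases hpd : p = '-' <;> simp [hpd]
        rw [show (if (c ≠ '-') then
              (acc.1 ++ [String.ofList [c]],
               if ((k : Int)) = 0 then acc.2 ++ [(0 : Int)]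
               else if PySem.List.pyGetD t0 ((k : Int) - 1) ' ' = '-' then acc.2 ++ [(1 : Int)]
               else acc.2 ++ [(0 : Int)])
            else acc)
          = (acc.1 ++ [String.ofList [c]], acc.2 ++ [if p = '-' then (1 : Int) else 0]) from by
            rw [if_pos hc, hlab]]
        rw [ih (k + 1) c _ hdrop (by simp [List.getD, hk])]
        simp [hc]

-- the zip-filter labels are labsOf
lemma zipLabels_eq_labsOf (t : List Char) :
    ∀ (p : Char),
      (((p :: t).zip t).filter (fun pc => pc.2 ≠ '-')).map (fun pc => if pc.1 = '-' then (1 : Int) else 0)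
        = labsOf p t := by
  induction t with
  | nil => intro p; simp [labsOf]
  | cons c t ih =>
      intro p
      by_cases hc : c = '-'
      · subst hc; simpa [labsOf] using ih '-'
      · simpa [labsOf, hc] using ih c

-- the zip-filter chars are just the non-dash chars
lemma zipChars_eq_filter (t : List Char) :
    ∀ (p : Char),
      (((p :: t).zip t).filter (fun pc => pc.2 ≠ '-')).map (fun pc => String.ofList [pc.2])
        = (t.filter (fun c => c ≠ '-')).map (fun c => String.ofList [c]) := by
  induction t with
  | nil => intro p; simp
  | cons c t ih =>
      intro p
      by_cases hc : c = '-'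
      · subst hc; simpa using ih '-'
      · simpa [hc] using ih c

-- so A's inner loop is (filter, labsOf ' ')
lemma xyCharsA_eq (t : List Char) :
    xyCharsA t = ((t.filter (fun c => c ≠ '-')).map (fun c => String.ofList [c]), labsOf ' ' t) := by
  have h := xyCharsA_suffix t t 0 ' ' ([], []) (by simp) (by simp)
  rw [zipChars_eq_filter, zipLabels_eq_labsOf] at h
  simpa [xyCharsA] using h

-- per-segment label block of B's inner loop
def segLab (seg : List Char) : List Int :=
  if seg ≠ [] then [(1 : Int)] ++ List.replicate (seg.length - 1) (0 : Int) else []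

-- B's label loop unfolded to an append of per-segment blocks
lemma labLoop_eq_flatMap (segs : List (List Char)) (init : List Int) :
    segs.foldl
      (fun (ls : List Int) seg =>
        if seg ≠ [] then ls ++ [(1 : Int)] ++ List.replicate (seg.length - 1) (0 : Int) else ls)
      init
    = init ++ segs.flatMap segLab := by
  induction segs generalizing init with
  | nil => simp
  | cons s segs ih =>
      rw [List.foldl_cons, ih]
      by_cases hs : s = [] <;> simp [segLab, hs, List.flatMap_cons, List.append_assoc]

-- one step of the split on a non-dash head: the char joins the first segment
lemma splitOn_cons_ne (c : Char) (t : List Char) (s : List Char) (rest : List (List Char))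
    (hc : ¬ c = '-') (hsr : List.splitOn '-' t = s :: rest) :
    List.splitOn '-' (c :: t) = (c :: s) :: rest := by
  have h1 : List.splitOn '-' (c :: t) = List.splitOnP (fun x => x == '-') (c :: t) := rfl
  have h2 : List.splitOnP (fun x => x == '-') t = s :: rest := hsr
  rw [h1, List.splitOnP_cons, h2]
  simp [hc]

-- one step of the split on a dash head: a fresh empty segment
lemma splitOn_cons_dash (t : List Char) :
    List.splitOn '-' ('-' :: t) = [] :: List.splitOn '-' t := by
  have h1 : List.splitOn '-' ('-' :: t) = List.splitOnP (fun x => x == '-') ('-' :: t) := rfl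
  rw [h1, List.splitOnP_cons]
  simp [List.splitOn]

-- joint characterisation of the split over one token:
-- (A) prev non-dash: head segment all-zero, later segments via segLab;
-- (B) prev dash: every segment via segLab.
lemma split_labels (t : List Char) :
    (List.replicate ((List.splitOn '-' t).headD []).length (0 : Int)
        ++ ((List.splitOn '-' t).tail).flatMap segLab = labsOf ' ' t)
    ∧ ((List.splitOn '-' t).flatMap segLab = labsOf '-' t) := by
  induction t with
  | nil => simp [List.splitOn, List.splitOnP_nil, labsOf, segLab]
  | cons c t ih =>
      obtain ⟨ihA', ihB⟩ := ih
      -- generalize (A) of the IH from sentinel ' ' to any non-dash prev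
      have ihA : ∀ p : Char, p ≠ '-' →
          List.replicate ((List.splitOn '-' t).headD []).length (0 : Int)
            ++ ((List.splitOn '-' t).tail).flatMap segLab = labsOf p t := by
        intro p hp
        rw [ihA']
        clear ihA' ihB
        induction t with
        | nil => simp [labsOf]
        | cons d t iht =>
            by_cases hd : d = '-' <;>
              simp [labsOf, hd, hp]
      by_cases hc : c = '-'
      · subst hc
        rw [splitOn_cons_dash]
        constructor
        · simpa [labsOf] using ihB
        · simpa [segLab, labsOf, List.flatMap_cons] using ihB
      · obtain ⟨s, rest, hsr⟩ : ∃ s rest, List.splitOn '-' t = s :: rest := by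
          rcases h : List.splitOn '-' t with _ | ⟨s, rest⟩
          · exact absurd h (List.splitOnP_ne_nil _ t)
          · exact ⟨s, rest, rfl⟩
        rw [splitOn_cons_ne c t s rest hc hsr]
        rw [hsr] at ihA ihB
        constructor
        · have := ihA c hc
          simp only [List.headD_cons, List.tail_cons] at this ⊢
          simp [labsOf, hc, List.replicate_succ, this]
        · have := ihA c hc
          simp only [List.headD_cons, List.tail_cons] at this
          simp [labsOf, hc, segLab, List.flatMap_cons, this]

-- the split's segments flattened are the non-dash chars
lemma split_chars (t : List Char) :
    (List.splitOn '-' t).flatMap (fun seg => seg.map (fun c => String.ofList [c]))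
      = (t.filter (fun c => c ≠ '-')).map (fun c => String.ofList [c]) := by
  induction t with
  | nil => simp [List.splitOn, List.splitOnP_nil]
  | cons c t ih =>
      by_cases hc : c = '-'
      · subst hc
        rw [splitOn_cons_dash]
        simpa [List.flatMap_cons, List.filter_cons] using ih
      · obtain ⟨s, rest, hsr⟩ : ∃ s rest, List.splitOn '-' t = s :: rest := by
          rcases h : List.splitOn '-' t with _ | ⟨s, rest⟩
          · exact absurd h (List.splitOnP_ne_nil _ t)
          · exact ⟨s, rest, rfl⟩
        rw [splitOn_cons_ne c t s rest hc hsr]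
        rw [hsr] at ih
        simpa [List.flatMap_cons, List.filter_cons, hc] using ih

-- B's whole per-token computation equals A's
lemma inner_eq (t : List Char) :
    xyCharsA t
      = ((List.splitOn '-' t).flatMap (fun seg => seg.map (fun c => String.ofList [c])),
         (List.splitOn '-' t).tail.foldl
           (fun (ls : List Int) seg =>
             if seg ≠ [] then ls ++ [(1 : Int)] ++ List.replicate (seg.length - 1) (0 : Int) else ls)
           (List.replicate ((List.splitOn '-' t).headD []).length (0 : Int))) := by
  rw [xyCharsA_eq, split_chars, labLoop_eq_flatMap, (split_labels t).1]

-- ===== VERDICT (by name: the statement is the Claim_ definition above) =====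
theorem x_and_y_spec : Claim_equal_x_and_y := by
  intro data _
  unfold Spec_x_and_y x_and_y x_and_y_alt
  refine List.foldl_ext _ _ _ ?_
  intro acc token _
  simp only [inner_eq]
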